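-- pv_equiv track=rewrite | github.com/dangnosuy/doanchuyennganh | agents/exec_agent.py | _find_poc_instruction
-- ===== SOURCE A (Python) =====
-- def _find_poc_instruction(conversation: list[dict]) -> str:
--     """Tìm PoC instruction trong conversation.
--
--     Ưu tiên:
--     1. REDTEAM message cuối cùng có ```python block
--     2. Fallback: REDTEAM message cuối cùng
--     3. Fallback: message cuối cùng trong conversation
--     """
--     last_with_code = ""
--     last_redteam = ""
--
--     for msg in reversed(conversation):
--         speaker = msg.get("speaker", "")
--         content = msg.get("content", "")
--
--         # Tìm REDTEAM msg có Python code block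
--         if speaker == "REDTEAM" and "```python" in content and not last_with_code:
--             last_with_code = content
--             break  # Tìm thấy rồi, dừng
--
--         # Backup: REDTEAM msg bất kỳ
--         if speaker == "REDTEAM" and not last_redteam:
--             last_redteam = content
--
--     return (
--         last_with_code
--         or last_redteam
--         or (conversation[-1].get("content", "") if conversation else "")
--     )
-- ===== SOURCE B (Python) =====
-- def _find_poc_instruction(conversation: list[dict]) -> str:
--     """Same result as A: built by two forward filtering passes instead of a
--     reverse loop with break/accumulators."""
--     codes = [m.get("content", "") for m in conversation
--              if m.get("speaker", "") == "REDTEAM"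
--              and "```python" in m.get("content", "")]
--     reds = [m.get("content", "") for m in conversation
--             if m.get("speaker", "") == "REDTEAM" and m.get("content", "")]
--     if codes:
--         return codes[-1]
--     if reds:
--         return reds[-1]
--     return conversation[-1].get("content", "") if conversation else ""
-- ===== Notes on version B (the rewrite author's own statement) =====
-- stated objective: simpler
-- what changed: Replaces the reverse loop with break and two mutable accumulators by two forward list comprehensions (last code-bearing REDTEAM message, last non-empty REDTEAM message) followed by a plain last-element fallback chain.
import Mathlib
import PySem

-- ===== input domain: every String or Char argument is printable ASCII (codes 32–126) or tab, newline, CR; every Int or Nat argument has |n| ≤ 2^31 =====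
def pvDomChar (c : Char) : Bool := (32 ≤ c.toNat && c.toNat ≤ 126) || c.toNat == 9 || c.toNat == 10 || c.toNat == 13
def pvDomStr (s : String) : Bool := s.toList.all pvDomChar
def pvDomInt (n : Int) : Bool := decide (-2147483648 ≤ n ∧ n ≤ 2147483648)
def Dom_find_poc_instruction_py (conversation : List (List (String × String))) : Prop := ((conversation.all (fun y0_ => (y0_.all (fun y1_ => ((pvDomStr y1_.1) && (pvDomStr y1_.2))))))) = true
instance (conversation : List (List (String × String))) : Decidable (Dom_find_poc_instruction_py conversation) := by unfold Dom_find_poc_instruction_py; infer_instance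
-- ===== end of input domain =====

-- B replaces A's reverse loop with break by two forward filtering passes plus a last-element
-- fallback chain (objective: simpler). Return values only; neither version mutates its argument.

-- ===== PORT A =====
-- the 'for msg in reversed(conversation)' loop: state = (last_with_code, last_redteam); 'break' = returning early
def pvLoopA : List (List (String × String)) → String → String → String × String
  | [], last_with_code, last_redteam => (last_with_code, last_redteam)
  | msg :: rest, last_with_code, last_redteam =>
    let speaker := (PySem.Dict.mk msg).getD "speaker" ""
    let content := (PySem.Dict.mk msg).getD "content" ""
    if speaker == "REDTEAM" && PySem.Str.isIn "```python" content && last_with_code == "" then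
      (content, last_redteam)   -- break
    else
      let last_redteam := if speaker == "REDTEAM" && last_redteam == "" then content else last_redteam
      pvLoopA rest last_with_code last_redteam

def find_poc_instruction_py (conversation : List (List (String × String))) : String :=
  let p := pvLoopA conversation.reverse "" ""
  -- 'x or y' on strings: x if x is non-empty else y
  if p.1 ≠ "" then p.1
  else if p.2 ≠ "" then p.2
  else if conversation == [] then ""
  else (PySem.Dict.mk (PySem.List.pyGetD conversation (-1) [])).getD "content" ""

-- ===== PORT B =====
def pvIsCode (m : List (String × String)) : Bool :=
  (PySem.Dict.mk m).getD "speaker" "" == "REDTEAM" &&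
    PySem.Str.isIn "```python" ((PySem.Dict.mk m).getD "content" "")

def pvIsRed (m : List (String × String)) : Bool :=
  (PySem.Dict.mk m).getD "speaker" "" == "REDTEAM" &&
    (PySem.Dict.mk m).getD "content" "" ≠ ""

def pvContent (m : List (String × String)) : String := (PySem.Dict.mk m).getD "content" ""

def find_poc_instruction_py_alt (conversation : List (List (String × String))) : String :=
  let codes := (conversation.filter pvIsCode).map pvContent
  let reds := (conversation.filter pvIsRed).map pvContent
  match codes.getLast? with
  | some c => c
  | none =>
    match reds.getLast? with
    | some c => c
    | none =>
      match conversation.getLast? with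
      | some m => (PySem.Dict.mk m).getD "content" ""
      | none => ""

-- ===== PRECONDITION & SPEC =====
def Spec_find_poc_instruction_py (conversation : List (List (String × String))) (out : String) : Prop := out = find_poc_instruction_py_alt conversation
instance (conversation : List (List (String × String))) (out : String) : Decidable (Spec_find_poc_instruction_py conversation out) := by unfold Spec_find_poc_instruction_py; infer_instance

-- ===== CLAIM (what is proved, stated in full; the proofs are below) =====
def Claim_equal_find_poc_instruction_py : Prop := ∀ (conversation : List (List (String × String))), Dom_find_poc_instruction_py conversation → Spec_find_poc_instruction_py conversation (find_poc_instruction_py conversation)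

-- ===== LEMMAS AND PROOFS =====

-- RHS shape of the loop invariant: what the or-chain yields, over the reversed list r
def pvTail (r : List (List (String × String))) (lrt fb : String) : String :=
  match (r.filter pvIsCode).head? with
  | some m => pvContent m
  | none =>
    if lrt ≠ "" then lrt
    else
      match (r.filter pvIsRed).head? with
      | some m => pvContent m
      | none => fb

lemma content_ne_of_code {m : List (String × String)} (hc : pvIsCode m = true) :
    pvContent m ≠ "" := by
  intro h
  unfold pvIsCode at hc
  rw [Bool.and_eq_true] at hc
  have h2 : PySem.Str.isIn "```python" (pvContent m) = true := hc.2
  rw [h] at h2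
  exact absurd h2 (by decide)

lemma loop_spec (r : List (List (String × String))) : ∀ lrt fb : String,
    (let p := pvLoopA r "" lrt;
     if p.1 ≠ "" then p.1 else if p.2 ≠ "" then p.2 else fb) = pvTail r lrt fb := by
  induction r with
  | nil => intro lrt fb; simp [pvLoopA, pvTail]
  | cons msg rest ih =>
    intro lrt fb
    by_cases hc : pvIsCode msg = true
    · have hne := content_ne_of_code hc
      unfold pvIsCode at hc
      rw [Bool.and_eq_true] at hc
      simp only [pvLoopA, pvTail, List.filter_cons, pvIsCode, hc.1, hc.2,
        Bool.and_true, Bool.true_and, beq_self_eq_true]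
      simp [pvContent] at hne ⊢
      simp [hne]
    · have hc' : ¬ ((PySem.Dict.mk msg).getD "speaker" "" == "REDTEAM" &&
          PySem.Str.isIn "```python" ((PySem.Dict.mk msg).getD "content" "") &&
          ("" : String) == "") = true := by
        simp only [pvIsCode] at hc
        simpa using hc
      simp only [pvLoopA, if_neg hc']
      rw [ih]
      -- compare pvTail rest lrt' fb with pvTail (msg::rest) lrt fb
      simp only [pvTail, List.filter_cons]
      have hcf : pvIsCode msg = false := by simpa using hc
      rw [hcf]
      by_cases hr : pvIsRed msg = true
      · have hr2 := hr
        unfold pvIsRed at hr2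
        rw [Bool.and_eq_true] at hr2
        obtain ⟨hsp, hct'⟩ := hr2
        have hct : ((PySem.Dict.mk msg).getD "content" "" ≠ "") := by simpa using hct'
        rw [hr]
        by_cases hl : lrt = ""
        · subst hl
          simp only [hsp, Bool.and_true, beq_self_eq_true, ne_eq,
            not_true_eq_false, if_false, ite_not]
          simp [hct, pvContent]
        · simp [hl, hsp]
      · have hrf : pvIsRed msg = false := by simpa using hr
        rw [hrf]
        by_cases hl : lrt = ""
        · subst hl
          by_cases hsp : ((PySem.Dict.mk msg).getD "speaker" "" == "REDTEAM") = true
          · -- REDTEAM with empty content: assignment writes "" back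
            have hce : (PySem.Dict.mk msg).getD "content" "" = "" := by
              unfold pvIsRed at hrf
              simp [hsp] at hrf
              simpa using hrf
            simp [hsp, hce]
          · simp [Bool.eq_false_iff.mpr hsp]
        · simp [hl]

lemma fallback_eq (conversation : List (List (String × String))) :
    (if conversation == [] then ""
     else (PySem.Dict.mk (PySem.List.pyGetD conversation (-1) [])).getD "content" "")
    = (match conversation.getLast? with
       | some m => (PySem.Dict.mk m).getD "content" ""
       | none => "") := by
  by_cases h : conversation = []
  · subst h; simp
  · rw [PySem.List.pyGetD_neg_one conversation [] h, List.getLast?_eq_some_getLast h]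
    simp [h]

-- ===== VERDICT (by name: the statement is the Claim_ definition above) =====
theorem find_poc_instruction_py_spec : Claim_equal_find_poc_instruction_py := by
  intro conversation _
  show find_poc_instruction_py conversation = find_poc_instruction_py_alt conversation
  unfold find_poc_instruction_py find_poc_instruction_py_alt
  rw [show (if (pvLoopA conversation.reverse "" "").1 ≠ "" then (pvLoopA conversation.reverse "" "").1
      else if (pvLoopA conversation.reverse "" "").2 ≠ "" then (pvLoopA conversation.reverse "" "").2
      else if conversation == [] then ""
      else (PySem.Dict.mk (PySem.List.pyGetD conversation (-1) [])).getD "content" "")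
      = pvTail conversation.reverse ""
        (if conversation == [] then ""
         else (PySem.Dict.mk (PySem.List.pyGetD conversation (-1) [])).getD "content" "")
    from loop_spec conversation.reverse "" _]
  rw [fallback_eq]
  simp only [pvTail, List.filter_reverse, List.head?_reverse, List.getLast?_map]
  cases (conversation.filter pvIsCode).getLast? with
  | some m => simp
  | none =>
    simp only [Option.map_none, ne_eq, not_true_eq_false, if_false]
    cases (conversation.filter pvIsRed).getLast? with
    | some m => simp
    | none => rfl
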